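-- pv_equiv track=rewrite | github.com/deveucatur/MODULO_GESTAO | pages/7 - Gestao de Prêmios.py | organizar_por_funcao
-- ===== SOURCE A (Python) =====
-- def organizar_por_funcao(dicionario):
--     gestores = []
--     especialistas = []
--     executores = []
--
--     for nome, (dados, funcao) in dicionario.items():
--         if funcao == 'Gestor':
--             gestores.append({nome: (dados, funcao)})
--         elif funcao == 'Especialista':
--             especialistas.append({nome: (dados, funcao)})
--         elif funcao == 'Executor':
--             executores.append({nome: (dados, funcao)})
--
--     resultado = {}
--     for gestor in gestores:
--         resultado.update(gestor)
--     for especialista in especialistas: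
--         resultado.update(especialista)
--     for executor in executores:
--         resultado.update(executor)
--
--     return resultado
-- ===== SOURCE B (Python) =====
-- RANK = {'Gestor': 0, 'Especialista': 1, 'Executor': 2}
--
-- def organizar_por_funcao(dicionario):
--     itens = [(nome, dv) for nome, dv in dicionario.items() if dv[1] in RANK]
--     itens.sort(key=lambda item: RANK[item[1][1]])
--     return dict(itens)
-- ===== Notes on version B (the rewrite author's own statement) =====
-- stated objective: simpler
-- what changed: Replaces A's three role bucket lists of singleton dicts merged by three update loops with a single filter keeping known roles followed by one stable sort on a role-rank key, building the result dict once; Pre_ only excludes association lists with a duplicated nome key, which cannot arise from A's dict argument.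
import Mathlib
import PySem

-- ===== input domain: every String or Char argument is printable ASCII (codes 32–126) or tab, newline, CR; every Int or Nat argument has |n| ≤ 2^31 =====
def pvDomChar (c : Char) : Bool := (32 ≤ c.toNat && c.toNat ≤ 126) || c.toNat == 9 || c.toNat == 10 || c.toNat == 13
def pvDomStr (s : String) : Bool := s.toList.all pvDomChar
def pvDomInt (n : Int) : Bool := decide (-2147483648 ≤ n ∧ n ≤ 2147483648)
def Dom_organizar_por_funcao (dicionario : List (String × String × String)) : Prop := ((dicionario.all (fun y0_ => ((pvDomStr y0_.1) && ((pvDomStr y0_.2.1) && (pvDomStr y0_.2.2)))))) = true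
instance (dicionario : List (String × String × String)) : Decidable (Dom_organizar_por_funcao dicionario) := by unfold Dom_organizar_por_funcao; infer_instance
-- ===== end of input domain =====

-- B replaces A's three role buckets plus three merge loops by one filter and one stable sort by a role-rank key (simpler; not claimed faster).

-- ===== PORT A =====
-- literal transliteration of A: three bucket lists of singleton dicts, then a fresh dict updated bucket by bucket
def organizar_por_funcao (dicionario : List (String × String × String)) : List (String × String × String) :=
  let buckets := dicionario.foldl
    (fun (acc : List (PySem.Dict String (String × String)) × List (PySem.Dict String (String × String)) × List (PySem.Dict String (String × String))) it =>
      if it.2.2 == "Gestor" then (acc.1 ++ [PySem.Dict.ofList [(it.1, it.2)]], acc.2.1, acc.2.2)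
      else if it.2.2 == "Especialista" then (acc.1, acc.2.1 ++ [PySem.Dict.ofList [(it.1, it.2)]], acc.2.2)
      else if it.2.2 == "Executor" then (acc.1, acc.2.1, acc.2.2 ++ [PySem.Dict.ofList [(it.1, it.2)]])
      else acc)
    ([], [], [])
  let r1 := buckets.1.foldl (fun r g => r.update g.items) PySem.Dict.empty
  let r2 := buckets.2.1.foldl (fun r e => r.update e.items) r1
  let r3 := buckets.2.2.foldl (fun r x => r.update x.items) r2
  r3.items

-- ===== PORT B =====
def RANK : PySem.Dict String Int := PySem.Dict.ofList [("Gestor", 0), ("Especialista", 1), ("Executor", 2)]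

def organizar_por_funcao_alt (dicionario : List (String × String × String)) : List (String × String × String) :=
  let itens := dicionario.filter (fun it => RANK.contains it.2.2)
  let ordenado := PySem.List.sorted itens (fun it => RANK.getD it.2.2 0)
  (PySem.Dict.ofList ordenado).items

-- ===== PRECONDITION & SPEC =====
-- Pre_ excludes association lists with a duplicated nome key: A's argument is a Python dict, whose item list never repeats a key.
def Pre_organizar_por_funcao (dicionario : List (String × String × String)) : Prop :=
  (dicionario.map Prod.fst).Nodup
instance (dicionario : List (String × String × String)) : Decidable (Pre_organizar_por_funcao dicionario) := by unfold Pre_organizar_por_funcao; infer_instance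

def pvWitness_organizar_por_funcao : (List (String × String × String)) :=
  [("ana", "d1", "Executor"), ("bia", "d2", "Gestor"), ("caio", "d3", "Outro")]

def Spec_organizar_por_funcao (dicionario : List (String × String × String)) (out : List (String × String × String)) : Prop := out = organizar_por_funcao_alt dicionario
instance (dicionario : List (String × String × String)) (out : List (String × String × String)) : Decidable (Spec_organizar_por_funcao dicionario out) := by unfold Spec_organizar_por_funcao; infer_instance

-- ===== CLAIM (what is proved, stated in full; the proofs are below) =====
def Claim_equal_organizar_por_funcao : Prop := ∀ (dicionario : List (String × String × String)), Dom_organizar_por_funcao dicionario → Pre_organizar_por_funcao dicionario → Spec_organizar_por_funcao dicionario (organizar_por_funcao dicionario)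

-- ===== LEMMAS AND PROOFS =====

def pvIsG (it : String × String × String) : Bool := it.2.2 == "Gestor"
def pvIsE (it : String × String × String) : Bool := it.2.2 == "Especialista"
def pvIsX (it : String × String × String) : Bool := it.2.2 == "Executor"
def pvIsR (it : String × String × String) : Bool := pvIsG it || pvIsE it || pvIsX it
def pvKey (it : String × String × String) : Int := RANK.getD it.2.2 0

theorem contains_RANK (s : String) :
    RANK.contains s = (s == "Gestor" || s == "Especialista" || s == "Executor") := by
  show (PySem.Dict.mk [("Gestor", (0:Int)), ("Especialista", 1), ("Executor", 2)]).contains s = _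
  simp [PySem.Dict.contains_mk, BEq.comm, Bool.or_assoc]

theorem G_not_E {it : String × String × String} (h : pvIsG it = true) : pvIsE it = false := by
  simp only [pvIsG, beq_iff_eq] at h; simp [pvIsE, h]
theorem G_not_X {it : String × String × String} (h : pvIsG it = true) : pvIsX it = false := by
  simp only [pvIsG, beq_iff_eq] at h; simp [pvIsX, h]
theorem E_not_G {it : String × String × String} (h : pvIsE it = true) : pvIsG it = false := by
  simp only [pvIsE, beq_iff_eq] at h; simp [pvIsG, h]
theorem E_not_X {it : String × String × String} (h : pvIsE it = true) : pvIsX it = false := by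
  simp only [pvIsE, beq_iff_eq] at h; simp [pvIsX, h]
theorem X_not_G {it : String × String × String} (h : pvIsX it = true) : pvIsG it = false := by
  simp only [pvIsX, beq_iff_eq] at h; simp [pvIsG, h]
theorem X_not_E {it : String × String × String} (h : pvIsX it = true) : pvIsE it = false := by
  simp only [pvIsX, beq_iff_eq] at h; simp [pvIsE, h]

theorem key_of_G {it : String × String × String} (h : pvIsG it = true) : pvKey it = 0 := by
  simp only [pvIsG, beq_iff_eq] at h; simp only [pvKey, h]; decide
theorem key_of_E {it : String × String × String} (h : pvIsE it = true) : pvKey it = 1 := by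
  simp only [pvIsE, beq_iff_eq] at h; simp only [pvKey, h]; decide
theorem key_of_X {it : String × String × String} (h : pvIsX it = true) : pvKey it = 2 := by
  simp only [pvIsX, beq_iff_eq] at h; simp only [pvKey, h]; decide

-- insertBy walks past a prefix it is not inserted before
theorem insertBy_skip {α : Type} (before : α → α → Bool) (x : α) (pre suf : List α)
    (h : ∀ y ∈ pre, before x y = false) :
    PySem.List.insertBy before x (pre ++ suf) = pre ++ PySem.List.insertBy before x suf := by
  induction pre with
  | nil => simp
  | cons a t ih =>
    simp only [List.cons_append, PySem.List.insertBy, h a (List.mem_cons_self)]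
    simp only [Bool.false_eq_true, if_false, List.cons.injEq, true_and]
    exact ih (fun y hy => h y (List.mem_cons_of_mem a hy))

-- insertBy puts x in front when it goes before everything
theorem insertBy_all {α : Type} (before : α → α → Bool) (x : α) (ys : List α)
    (h : ∀ y ∈ ys, before x y = true) :
    PySem.List.insertBy before x ys = x :: ys := by
  cases ys with
  | nil => rfl
  | cons a t => simp [PySem.List.insertBy, h a (List.mem_cons_self)]

-- updating with pairwise-fresh keys appends the pairs
theorem update_items (ps : List (String × String × String)) :
    ∀ (d : PySem.Dict String (String × String)),
    (d.items.map Prod.fst ++ ps.map Prod.fst).Nodup →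
    (d.update ps).items = d.items ++ ps := by
  induction ps with
  | nil => intro d _; simp [PySem.Dict.update]
  | cons p t ih =>
    intro d hnd
    have hc : d.contains p.1 = false := by
      rw [PySem.Dict.contains_eq_decide_mem_keys]
      cases d with
      | mk items =>
        simp only [PySem.Dict.keys_mk]
        simp only [List.map_cons, List.nodup_append, List.nodup_cons] at hnd
        simp only [decide_eq_false_iff_not]
        intro hmem
        exact hnd.2.2 p.1 hmem p.1 List.mem_cons_self rfl
    have hstep : d.update (p :: t) = (d.insert p.1 p.2).update t := by
      simp [PySem.Dict.update]
    rw [hstep, ih]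
    · rw [PySem.Dict.items_insert_of_not_contains d p.2 hc]
      simp
    · rw [PySem.Dict.items_insert_of_not_contains d p.2 hc]
      simp only [List.map_append, List.map_cons, List.map_nil] at *
      simpa [List.append_assoc] using hnd

-- two consecutive updates are one update with the concatenated pair lists
theorem update_update (d : PySem.Dict String (String × String))
    (ps qs : List (String × String × String)) :
    (d.update ps).update qs = d.update (ps ++ qs) := by
  simp [PySem.Dict.update, List.foldl_append]

-- folding `update` over singleton dicts is one update with all the items
theorem foldl_update_singletons (items : List (String × String × String)) :
    ∀ (r : PySem.Dict String (String × String)),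
    items.foldl (fun r it => r.update (PySem.Dict.ofList [(it.1, it.2)]).items) r = r.update items := by
  induction items with
  | nil => intro r; simp [PySem.Dict.update]
  | cons it t ih =>
    intro r
    simp only [List.foldl_cons]
    rw [ih]
    simp [PySem.Dict.update, PySem.Dict.ofList, PySem.Dict.insert, PySem.Dict.contains, PySem.Dict.empty]

-- the three filtered buckets are a permutation of the single role filter
theorem roles_perm (l : List (String × String × String)) :
    (l.filter pvIsG ++ (l.filter pvIsE ++ l.filter pvIsX)).Perm (l.filter pvIsR) := by
  induction l with
  | nil => simp
  | cons a t ih =>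
    by_cases hg : pvIsG a = true
    · have hr : pvIsR a = true := by simp [pvIsR, hg]
      simp only [List.filter_cons, hg, G_not_E hg, G_not_X hg, hr, if_true, Bool.false_eq_true,
        if_false, List.cons_append]
      exact ih.cons a
    · by_cases he : pvIsE a = true
      · have hr : pvIsR a = true := by simp [pvIsR, he]
        simp only [List.filter_cons, hg, he, E_not_X he, hr, if_true, if_false,
          Bool.false_eq_true, List.cons_append]
        exact List.Perm.trans List.perm_middle (ih.cons a)
      · by_cases hx : pvIsX a = true
        · have hr : pvIsR a = true := by simp [pvIsR, hx]
          simp only [List.filter_cons, hg, he, hx, hr, if_true, if_false, Bool.false_eq_true]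
          refine List.Perm.trans ?_ (List.Perm.trans List.perm_middle (ih.cons a))
          exact List.Perm.append_left _ List.perm_middle
        · have hr : pvIsR a = false := by simp [pvIsR, hg, he, hx]
          simp only [List.filter_cons, hg, he, hx, hr, if_false, Bool.false_eq_true]
          exact ih

theorem keys_nodup (l : List (String × String × String))
    (h : (l.map Prod.fst).Nodup) :
    ((l.filter pvIsG ++ (l.filter pvIsE ++ l.filter pvIsX)).map Prod.fst).Nodup := by
  have hperm := (roles_perm l).map Prod.fst
  exact hperm.nodup_iff.mpr (((List.filter_sublist (p := pvIsR)).map Prod.fst).nodup h)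

-- the stable sort by rank lays the list out as the three role filters in order
theorem sorted_roles (m : List (String × String × String))
    (h : ∀ it ∈ m, pvIsR it = true) :
    PySem.List.sorted m pvKey = m.filter pvIsG ++ (m.filter pvIsE ++ m.filter pvIsX) := by
  induction m using List.reverseRecOn with
  | nil => simp [PySem.List.sorted_eq_foldl_insertBy]
  | append_singleton t a ih =>
    have ht : ∀ it ∈ t, pvIsR it = true := fun it hit => h it (List.mem_append_left _ hit)
    have ha : pvIsR a = true := h a (List.mem_append_right _ List.mem_cons_self)
    have keyG : ∀ y ∈ t.filter pvIsG, pvKey y = 0 := fun y hy => key_of_G (List.of_mem_filter hy)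
    have keyE : ∀ y ∈ t.filter pvIsE, pvKey y = 1 := fun y hy => key_of_E (List.of_mem_filter hy)
    have keyX : ∀ y ∈ t.filter pvIsX, pvKey y = 2 := fun y hy => key_of_X (List.of_mem_filter hy)
    rw [PySem.List.sorted_eq_foldl_insertBy] at ih ⊢
    rw [List.foldl_append, List.foldl_cons, List.foldl_nil, ih ht]
    simp only [List.filter_append, List.filter_cons, List.filter_nil]
    have ha' : pvIsG a = true ∨ pvIsE a = true ∨ pvIsX a = true := by
      simpa [pvIsR, Bool.or_assoc] using ha
    rcases ha' with hg | he | hx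
    · simp only [hg, G_not_E hg, G_not_X hg, if_true, Bool.false_eq_true, if_false]
      rw [insertBy_skip _ _ _ _ (fun y hy => by
        simp [key_of_G hg, keyG y hy])]
      rw [insertBy_all _ _ _ (fun y hy => by
        rcases List.mem_append.mp hy with h1 | h1
        · simp [key_of_G hg, keyE y h1]
        · simp [key_of_G hg, keyX y h1])]
      simp
    · simp only [he, E_not_G he, E_not_X he, if_true, Bool.false_eq_true, if_false]
      rw [← List.append_assoc]
      rw [insertBy_skip _ _ _ _ (fun y hy => by
        rcases List.mem_append.mp hy with h1 | h1
        · simp [key_of_E he, keyG y h1]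
        · simp [key_of_E he, keyE y h1])]
      rw [insertBy_all _ _ _ (fun y hy => by
        simp [key_of_E he, keyX y hy])]
      simp
    · simp only [hx, X_not_G hx, X_not_E hx, if_true, Bool.false_eq_true, if_false]
      have hskip := insertBy_skip (fun p q => decide (pvKey p < pvKey q)) a
        (t.filter pvIsG ++ (t.filter pvIsE ++ t.filter pvIsX)) [] (fun y hy => by
        rcases List.mem_append.mp hy with h1 | h1
        · simp [key_of_X hx, keyG y h1]
        · rcases List.mem_append.mp h1 with h2 | h2
          · simp [key_of_X hx, keyE y h2]
          · simp [key_of_X hx, keyX y h2])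
      simp only [List.append_nil] at hskip
      rw [hskip]
      simp [PySem.List.insertBy]

-- A's first loop: the three buckets are the three role filters, as singleton dicts
theorem buckets_inv (l : List (String × String × String)) :
    ∀ (acc : List (PySem.Dict String (String × String)) × List (PySem.Dict String (String × String)) × List (PySem.Dict String (String × String))),
    l.foldl
      (fun acc it =>
        if it.2.2 == "Gestor" then (acc.1 ++ [PySem.Dict.ofList [(it.1, it.2)]], acc.2.1, acc.2.2)
        else if it.2.2 == "Especialista" then (acc.1, acc.2.1 ++ [PySem.Dict.ofList [(it.1, it.2)]], acc.2.2)
        else if it.2.2 == "Executor" then (acc.1, acc.2.1, acc.2.2 ++ [PySem.Dict.ofList [(it.1, it.2)]])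
        else acc) acc
    = (acc.1 ++ (l.filter pvIsG).map (fun it => PySem.Dict.ofList [(it.1, it.2)]),
       acc.2.1 ++ (l.filter pvIsE).map (fun it => PySem.Dict.ofList [(it.1, it.2)]),
       acc.2.2 ++ (l.filter pvIsX).map (fun it => PySem.Dict.ofList [(it.1, it.2)])) := by
  induction l with
  | nil => intro acc; simp
  | cons a t ih =>
    intro acc
    simp only [List.foldl_cons, List.filter_cons]
    by_cases hg : pvIsG a = true
    · simp only [show (a.2.2 == "Gestor") = true from hg, if_true, ih, List.map_cons,
        hg, G_not_E hg, G_not_X hg, Bool.false_eq_true, if_false]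
      simp [List.append_assoc]
    · have hg' : pvIsG a = false := by simpa using hg
      by_cases he : pvIsE a = true
      · simp only [show (a.2.2 == "Gestor") = false from hg',
          show (a.2.2 == "Especialista") = true from he, Bool.false_eq_true, if_false, if_true,
          ih, List.map_cons, hg', he, E_not_X he]
        simp [List.append_assoc]
      · have he' : pvIsE a = false := by simpa using he
        by_cases hx : pvIsX a = true
        · simp only [show (a.2.2 == "Gestor") = false from hg',
            show (a.2.2 == "Especialista") = false from he',
            show (a.2.2 == "Executor") = true from hx, Bool.false_eq_true, if_false, if_true,
            ih, List.map_cons, hg', he', hx]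
          simp [List.append_assoc]
        · have hx' : pvIsX a = false := by simpa using hx
          simp only [show (a.2.2 == "Gestor") = false from hg',
            show (a.2.2 == "Especialista") = false from he',
            show (a.2.2 == "Executor") = false from hx', Bool.false_eq_true, if_false,
            ih, hg', he', hx']

theorem A_char (l : List (String × String × String))
    (h : (l.map Prod.fst).Nodup) :
    organizar_por_funcao l = l.filter pvIsG ++ (l.filter pvIsE ++ l.filter pvIsX) := by
  unfold organizar_por_funcao
  rw [buckets_inv l ([], [], [])]
  simp only [List.nil_append, List.foldl_map, foldl_update_singletons, update_update]
  have hnd : ((PySem.Dict.empty : PySem.Dict String (String × String)).items.map Prod.fst ++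
      (l.filter pvIsG ++ (l.filter pvIsE ++ l.filter pvIsX)).map Prod.fst).Nodup := by
    simpa [PySem.Dict.empty] using keys_nodup l h
  rw [List.append_assoc, update_items _ _ hnd]
  simp [PySem.Dict.empty]

theorem B_char (l : List (String × String × String))
    (h : (l.map Prod.fst).Nodup) :
    organizar_por_funcao_alt l = l.filter pvIsG ++ (l.filter pvIsE ++ l.filter pvIsX) := by
  unfold organizar_por_funcao_alt
  have hfil : l.filter (fun it => RANK.contains it.2.2) = l.filter pvIsR :=
    List.filter_congr (fun it _ => by rw [contains_RANK]; rfl)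
  have hkey : (fun it : String × String × String => RANK.getD it.2.2 0) = pvKey := rfl
  rw [hfil, hkey]
  show (PySem.Dict.ofList (PySem.List.sorted (l.filter pvIsR) pvKey)).items = _
  rw [sorted_roles _ (fun it hit => List.of_mem_filter hit)]
  have hcol : ∀ (p : (String × String × String) → Bool),
      (∀ it, p it = true → pvIsR it = true) →
      (l.filter pvIsR).filter p = l.filter p := by
    intro p hp
    rw [List.filter_filter]
    exact List.filter_congr (fun it _ => by
      by_cases hpit : p it = true
      · simp [hpit, hp it hpit]
      · simp [Bool.not_eq_true] at hpit; simp [hpit])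
  rw [hcol pvIsG (fun it hit => by simp [pvIsR, hit]),
      hcol pvIsE (fun it hit => by simp [pvIsR, hit]),
      hcol pvIsX (fun it hit => by simp [pvIsR, hit])]
  have hnd : ((PySem.Dict.empty : PySem.Dict String (String × String)).items.map Prod.fst ++
      (l.filter pvIsG ++ (l.filter pvIsE ++ l.filter pvIsX)).map Prod.fst).Nodup := by
    simpa [PySem.Dict.empty] using keys_nodup l h
  show (PySem.Dict.empty.update _).items = _
  rw [update_items _ _ hnd]
  simp [PySem.Dict.empty]

-- ===== VERDICT (by name: the statement is the Claim_ definition above) =====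
theorem organizar_por_funcao_spec : Claim_equal_organizar_por_funcao := by
  intro l _ hpre
  unfold Spec_organizar_por_funcao
  rw [A_char l hpre, B_char l hpre]
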